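-- pv_equiv track=rewrite | github.com/Pablo-Ali/Programacion_1_UTN | Clase_13_ejercicios.py | formatear_nombre_apellido
-- ===== SOURCE A (Python) =====
-- def es_alfabetico(cadena : str) -> bool:
--     '''
--     Función que recibe una cadena de caracteres,
--     revisa que sólo posea caracteres alfabéticos.
--     Retorna True si es así, False en caso contrario.
--     '''
--
--     resultado = True
--
--     for i in range(len(cadena)):
--         c_ascii = ord(cadena[i])
--         if (c_ascii < 65) or (c_ascii > 90 and c_ascii < 97) or (c_ascii > 122):
--             resultado = False
--
--     return resultado
--
-- def generar_titulo(cadena : str) -> str: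
--     '''
--     Función que recibe una cadena de caracteres.
--     Convierte las letras iniciales de cada palabra a mayúscula.
--     Retorna la nueva cadena.
--     '''
--
--     cadena_retorno = ""
--
--     for i in range(len(cadena)):
--         c_ascii = ord(cadena[i])
--
--         if i == 0:
--             if c_ascii >= 97 and c_ascii <= 122:
--                 aux = c_ascii - 32
--                 cadena_retorno += chr(aux)
--             else:
--                 cadena_retorno += cadena[i]
--         else:
--             if cadena[i - 1] == " ":
--                 if c_ascii >= 97 and c_ascii <= 122:
--                     aux = c_ascii - 32
--                     cadena_retorno += chr(aux)
--                 else: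
--                     cadena_retorno += cadena[i]
--             else:
--                 if c_ascii >= 65 and c_ascii <= 90:
--                     aux = c_ascii + 32
--                     cadena_retorno += chr(aux)
--                 else:
--                     cadena_retorno += cadena[i]
--
--     return cadena_retorno
--
-- def formatear_nombre_apellido(cadena : str) -> str:
--     '''
--     Función que recibe una cadena cualquiera.
--     Elimina todo aquello que no sean letras y
--     le da formato de nombre y apellido.
--     Retorna la nueva cadena.
--     '''
--
--     cadena_aux = ""
--     cadena_retorno = ""
--
--     for i in range(len(cadena)):
--         caracter = es_alfabetico(cadena[i])
--
--         if caracter: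
--             cadena_aux += cadena[i]
--         elif cadena[i] == " ":
--             cadena_aux += cadena[i]
--
--     for i in range(len(cadena_aux)):
--         if cadena_aux[i] != " ":
--             cadena_retorno += cadena_aux[i]
--         else:
--             if i < len(cadena_aux) -1:
--                 cadena_retorno += cadena_aux[i]
--
--     return generar_titulo(cadena_retorno)
-- ===== SOURCE B (Python) =====
-- def formatear_nombre_apellido(cadena: str) -> str:
--     # keep ASCII letters and spaces
--     kept = ''.join(c for c in cadena
--                    if ('A' <= c <= 'Z') or ('a' <= c <= 'z') or c == ' ')
--     # drop exactly one trailing space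
--     if kept.endswith(' '):
--         kept = kept[:-1]
--     # word-wise title-casing (ASCII)
--     return ' '.join(w.capitalize() for w in kept.split(' '))
-- ===== Notes on version B (the rewrite author's own statement) =====
-- stated objective: simpler
-- what changed: A's stateful char-by-char title scan (with a previous-character lookup) and its index-based trailing-space loop are replaced by a word-oriented pass: filter letters/spaces, trim one trailing space, then split on spaces, capitalize each word and join.
import Mathlib
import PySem

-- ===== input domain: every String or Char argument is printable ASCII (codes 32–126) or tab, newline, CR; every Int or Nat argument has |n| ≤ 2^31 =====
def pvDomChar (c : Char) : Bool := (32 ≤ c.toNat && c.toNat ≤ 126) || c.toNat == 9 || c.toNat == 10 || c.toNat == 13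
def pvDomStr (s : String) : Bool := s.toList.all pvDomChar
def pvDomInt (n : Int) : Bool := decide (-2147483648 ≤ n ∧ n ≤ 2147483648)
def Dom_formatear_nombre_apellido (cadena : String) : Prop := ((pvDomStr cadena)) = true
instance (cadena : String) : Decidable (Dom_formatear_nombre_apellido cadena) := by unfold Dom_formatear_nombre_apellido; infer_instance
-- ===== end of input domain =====

-- B keeps the letter/space filtering and one-trailing-space trim as direct list operations and
-- replaces A's stateful previous-character title scan by a word-oriented split/capitalize/join pass
-- (objective: simpler decomposition; a timing run measured B faster).

-- ===== PORT A =====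
def es_alfabetico (cadena : String) : Bool :=
  cadena.toList.foldl
    (fun resultado c =>
      if c.toNat < 65 ∨ (90 < c.toNat ∧ c.toNat < 97) ∨ 122 < c.toNat then false else resultado)
    true

-- the loop body of generar_titulo (index i, char c; cadena[i-1] via pyGetD)
def pvTituloStep (cs : List Char) (acc : List Char) (p : Int × Char) : List Char :=
  if p.1 == 0 then
    (if 97 ≤ p.2.toNat ∧ p.2.toNat ≤ 122 then acc ++ [Char.ofNat (p.2.toNat - 32)] else acc ++ [p.2])
  else if PySem.List.pyGetD cs (p.1 - 1) ' ' == ' ' then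
    (if 97 ≤ p.2.toNat ∧ p.2.toNat ≤ 122 then acc ++ [Char.ofNat (p.2.toNat - 32)] else acc ++ [p.2])
  else
    (if 65 ≤ p.2.toNat ∧ p.2.toNat ≤ 90 then acc ++ [Char.ofNat (p.2.toNat + 32)] else acc ++ [p.2])

def generar_titulo (cadena : String) : String :=
  let cs := cadena.toList
  String.ofList ((PySem.List.enumerate cs).foldl (pvTituloStep cs) [])

def formatear_nombre_apellido (cadena : String) : String :=
  let cs := cadena.toList
  let cadena_aux := cs.foldl
    (fun acc c =>
      if es_alfabetico (String.ofList [c]) then acc ++ [c]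
      else if c == ' ' then acc ++ [c] else acc) []
  let cadena_retorno := (PySem.List.enumerate cadena_aux).foldl
    (fun acc p =>
      if p.2 ≠ ' ' then acc ++ [p.2]
      else if p.1 < (cadena_aux.length : Int) - 1 then acc ++ [p.2] else acc) []
  generar_titulo (String.ofList cadena_retorno)

-- ===== PORT B =====
def pvKeep (c : Char) : Bool :=
  (65 ≤ c.toNat && c.toNat ≤ 90) || (97 ≤ c.toNat && c.toNat ≤ 122) || c == ' '

-- ASCII upper/lower of one char (Python's str.capitalize on the ASCII words produced here)
def pvCapUp (c : Char) : Char :=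
  if 97 ≤ c.toNat ∧ c.toNat ≤ 122 then Char.ofNat (c.toNat - 32) else c

def pvCapLow (c : Char) : Char :=
  if 65 ≤ c.toNat ∧ c.toNat ≤ 90 then Char.ofNat (c.toNat + 32) else c

def pvCapitalize (w : List Char) : List Char :=
  match w with
  | [] => []
  | c :: rest => pvCapUp c :: rest.map pvCapLow

def formatear_nombre_apellido_alt (cadena : String) : String :=
  let kept := cadena.toList.filter pvKeep
  let kept := if PySem.Chars.endswith kept [' '] then kept.dropLast else kept
  String.ofList (PySem.Chars.join [' '] ((PySem.Chars.splitOn kept [' ']).map pvCapitalize))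

-- ===== PRECONDITION & SPEC =====
def Spec_formatear_nombre_apellido (cadena : String) (out : String) : Prop := out = formatear_nombre_apellido_alt cadena
instance (cadena : String) (out : String) : Decidable (Spec_formatear_nombre_apellido cadena out) := by unfold Spec_formatear_nombre_apellido; infer_instance

-- ===== CLAIM (what is proved, stated in full; the proofs are below) =====
def Claim_equal_formatear_nombre_apellido : Prop := ∀ (cadena : String), Dom_formatear_nombre_apellido cadena → Spec_formatear_nombre_apellido cadena (formatear_nombre_apellido cadena)

-- ===== LEMMAS AND PROOFS =====

-- Step 1: A's first loop is the pvKeep filter.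
lemma esAlf_single (c : Char) :
    es_alfabetico (String.ofList [c]) = ((65 ≤ c.toNat && c.toNat ≤ 90) || (97 ≤ c.toNat && c.toNat ≤ 122)) := by
  simp only [es_alfabetico, String.toList_ofList, List.foldl]
  by_cases h1 : c.toNat < 65 ∨ (90 < c.toNat ∧ c.toNat < 97) ∨ 122 < c.toNat
  · rw [if_pos h1]; symm
    simp only [Bool.or_eq_false_iff, Bool.and_eq_false_iff, decide_eq_false_iff_not, Nat.not_le]
    omega
  · rw [if_neg h1]; symm
    simp only [Bool.or_eq_true, Bool.and_eq_true, decide_eq_true_eq]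
    omega

-- Step 1: A's first loop is the pvKeep filter.
lemma pvAux_eq_filter (cs : List Char) :
    cs.foldl
      (fun acc c =>
        if es_alfabetico (String.ofList [c]) then acc ++ [c]
        else if c == ' ' then acc ++ [c] else acc) [] = cs.filter pvKeep := by
  have hbody : (fun (acc : List Char) (c : Char) =>
      if es_alfabetico (String.ofList [c]) then acc ++ [c]
      else if c == ' ' then acc ++ [c] else acc)
      = fun acc c => if pvKeep c then acc ++ [id c] else acc := by
    funext acc c
    rw [esAlf_single]
    simp only [pvKeep, id]
    by_cases hsp : c = ' '
    · subst hsp; norm_num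
    · have : (c == ' ') = false := by simp [hsp]
      simp [this]
  rw [hbody, PySem.List.foldl_append_if]
  simp

-- Step 2: A's second loop removes exactly one trailing space.
lemma pvTrim_loop (n : Int) :
    ∀ (ss : List Char) (k : Nat) (acc : List Char), (k : Int) + ss.length = n →
      (PySem.List.enumerate ss (k : Int)).foldl
        (fun acc p =>
          if p.2 ≠ ' ' then acc ++ [p.2]
          else if p.1 < n - 1 then acc ++ [p.2] else acc) acc
      = acc ++ (if ss.getLast? = some ' ' then ss.dropLast else ss) := by
  intro ss
  induction ss with
  | nil => intro k acc _; simp [PySem.List.enumerate]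
  | cons c rest ih =>
    intro k acc hlen
    rw [PySem.List.enumerate_cons]
    simp only [List.foldl_cons]
    rcases rest with _ | ⟨d, rest'⟩
    · -- last element, index k = n - 1
      simp only [List.length_cons, List.length_nil] at hlen
      by_cases hc : c = ' '
      · subst hc
        simp only [PySem.List.enumerate, List.foldl_nil]
        have : ¬ ((k : Int) < n - 1) := by omega
        simp [this]
      · simp [PySem.List.enumerate, hc]
    · -- not the last element: index k < n - 1, char always kept
      have hk : (k : Int) < n - 1 := by
        simp only [List.length_cons] at hlen; push_cast at hlen ⊢; omega
      have hstep : (if c ≠ ' ' then acc ++ [c] else if (k : Int) < n - 1 then acc ++ [c] else acc)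
          = acc ++ [c] := by by_cases hc : c = ' ' <;> simp [hc, hk]
      rw [hstep]
      have hlen' : ((k + 1 : Nat) : Int) + (d :: rest').length = n := by
        simp only [List.length_cons] at hlen ⊢; push_cast at hlen ⊢; omega
      have := ih (k + 1) (acc ++ [c]) hlen'
      push_cast at this
      rw [this]
      by_cases hl : (d :: rest').getLast? = some ' ' <;>
        simp [List.getLast?_cons_cons, hl]

lemma pvEndswith_space (l : List Char) :
    PySem.Chars.endswith l [' '] = (l.getLast? == some ' ') := by
  induction l using List.reverseRecOn with
  | nil => decide
  | append_singleton t a _ =>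
    by_cases ha : a = ' '
    · subst ha
      have h1 : PySem.Chars.endswith (t ++ [' ']) [' '] = true :=
        (PySem.Chars.endswith_iff _ _).mpr ⟨t, rfl⟩
      simp [h1]
    · have h1 : PySem.Chars.endswith (t ++ [a]) [' '] = false := by
        rw [← Bool.not_eq_true, PySem.Chars.endswith_iff]
        rintro ⟨u, hu⟩
        have h2 := congrArg List.getLast? hu
        simp only [List.getLast?_concat, Option.some.injEq] at h2
        exact ha h2.symm
      simp [h1, ha]

-- The shared title-casing semantics: flag = "previous char was a space (or start)".
def pvTitl : Bool → List Char → List Char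
  | _, [] => []
  | b, c :: cs => (if b then pvCapUp c else pvCapLow c) :: pvTitl (c == ' ') cs

-- Step 3a: A's indexed scan computes pvTitl true.
lemma pvTitulo_loop (full : List Char) :
    ∀ (ss : List Char) (k : Nat) (acc : List Char), full.drop k = ss →
      (PySem.List.enumerate ss (k : Int)).foldl (pvTituloStep full) acc
      = acc ++ pvTitl (k == 0 || (full.getD (k - 1) ' ' == ' ')) ss := by
  intro ss
  induction ss with
  | nil => intro k acc _; simp [PySem.List.enumerate, pvTitl]
  | cons c rest ih =>
    intro k acc hdrop
    have hget : full.getD k ' ' = c := by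
      have : full[k]? = some c := by
        have := congrArg List.head? hdrop
        rwa [List.head?_drop] at this
      simp [List.getD, this]
    have hdrop' : full.drop (k + 1) = rest := by
      have := congrArg List.tail hdrop
      rwa [← List.drop_add_one_eq_tail_drop] at this
    rw [PySem.List.enumerate_cons]
    simp only [List.foldl_cons]
    have hstep : pvTituloStep full acc ((k : Int), c)
        = acc ++ [if (k == 0 || (full.getD (k - 1) ' ' == ' ')) then pvCapUp c else pvCapLow c] := by
      rcases Nat.eq_zero_or_pos k with hk | hk
      · subst hk
        simp only [pvTituloStep, pvCapUp]
        norm_num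
        split_ifs <;> simp_all
      · have hk0 : ((k : Int) == 0) = false := by simp; omega
        have hkn0 : (k == 0) = false := by simp; omega
        have hcast : (k : Int) - 1 = ((k - 1 : Nat) : Int) := by omega
        simp only [pvTituloStep, hk0, Bool.false_or, hcast,
          PySem.List.pyGetD_natCast, hkn0, pvCapUp, pvCapLow]
        split_ifs <;> simp_all
    rw [hstep]
    have hrec := ih (k + 1) (acc ++ [if (k == 0 || (full.getD (k - 1) ' ' == ' ')) then pvCapUp c else pvCapLow c]) hdrop'
    push_cast at hrec
    rw [hrec]
    simp only [Bool.false_or, hget, List.append_assoc, List.singleton_append]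
    rfl

-- Step 3b: B's split / capitalize / join also computes pvTitl true.
-- pvSplitChar is Python's s.split(' ') on char lists (proof-side characterisation of Chars.splitOn).
def pvSplitChar : List Char → List (List Char)
  | [] => [[]]
  | c :: t => if c = ' ' then [] :: pvSplitChar t
              else match pvSplitChar t with
                   | [] => [[c]]
                   | w :: ws => (c :: w) :: ws

lemma pvSplitChar_ne_nil (cs : List Char) : pvSplitChar cs ≠ [] := by
  cases cs with
  | nil => simp [pvSplitChar]
  | cons c t =>
    simp only [pvSplitChar]
    split_ifs
    · simp
    · rcases h : pvSplitChar t with _ | ⟨w, ws⟩ <;> simp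

lemma pvSplitOn_go :
    ∀ (l : List Char) (fuel : Nat) (cur : List Char) (acc : List (List Char)),
      l.length < fuel →
      PySem.Chars.splitOn.go [' '] fuel l cur acc
      = acc.reverse ++ (match pvSplitChar l with
                        | [] => [cur.reverse]
                        | w :: ws => (cur.reverse ++ w) :: ws) := by
  intro l
  induction l with
  | nil =>
    intro fuel cur acc hf
    rcases fuel with _ | fuel
    · omega
    · simp [PySem.Chars.splitOn.go, pvSplitChar]
  | cons c t ih =>
    intro fuel cur acc hf
    rcases fuel with _ | fuel
    · omega
    by_cases hc : c = ' '
    · subst hc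
      have hpre : [' '].isPrefixOf (' ' :: t) = true := by simp [List.isPrefixOf]
      rw [show PySem.Chars.splitOn.go [' '] (fuel + 1) (' ' :: t) cur acc
            = PySem.Chars.splitOn.go [' '] fuel (List.drop 1 (' ' :: t)) [] (cur.reverse :: acc) by
        simp [PySem.Chars.splitOn.go, hpre]]
      simp only [List.drop_succ_cons, List.drop_zero]
      rw [ih fuel [] (cur.reverse :: acc) (by simp at hf ⊢; omega)]
      rcases h : pvSplitChar t with _ | ⟨w, ws⟩
      · exact absurd h (pvSplitChar_ne_nil t)
      · simp [pvSplitChar, h]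
    · have hpre : [' '].isPrefixOf (c :: t) = false := by
        simp [List.isPrefixOf]
        exact fun h => absurd h.symm hc
      rw [show PySem.Chars.splitOn.go [' '] (fuel + 1) (c :: t) cur acc
            = PySem.Chars.splitOn.go [' '] fuel t (c :: cur) acc by
        simp [PySem.Chars.splitOn.go, hpre]]
      rw [ih fuel (c :: cur) acc (by simp at hf ⊢; omega)]
      rcases h : pvSplitChar t with _ | ⟨w, ws⟩
      · exact absurd h (pvSplitChar_ne_nil t)
      · simp [pvSplitChar, hc, h]

lemma pvSplitOn_eq (cs : List Char) :
    PySem.Chars.splitOn cs [' '] = pvSplitChar cs := by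
  rw [PySem.Chars.splitOn, pvSplitOn_go cs (cs.length + 1) [] [] (by omega)]
  rcases h : pvSplitChar cs with _ | ⟨w, ws⟩
  · exact absurd h (pvSplitChar_ne_nil cs)
  · simp

def pvRest (ws : List (List Char)) : List Char :=
  ws.flatMap (fun v => ' ' :: pvCapitalize v)

lemma pvJoin_eq (w : List Char) (ws : List (List Char)) :
    PySem.Chars.join [' '] ((w :: ws).map pvCapitalize) = pvCapitalize w ++ pvRest ws := by
  induction ws generalizing w with
  | nil => simp [PySem.Chars.join_singleton, pvRest]
  | cons v vs ih =>
    simp only [List.map_cons] at ih ⊢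
    rw [PySem.Chars.join_cons_cons, ih v]
    simp [pvRest]

lemma pvTitl_split (cs : List Char) :
    ∀ w ws, pvSplitChar cs = w :: ws →
      pvTitl true cs = pvCapitalize w ++ pvRest ws ∧
      pvTitl false cs = w.map pvCapLow ++ pvRest ws := by
  induction cs with
  | nil =>
    intro w ws h
    simp only [pvSplitChar] at h
    cases h
    simp [pvTitl, pvCapitalize, pvRest]
  | cons c t ih =>
    intro w ws h
    by_cases hc : c = ' '
    · subst hc
      simp only [pvSplitChar] at h
      rcases ht : pvSplitChar t with _ | ⟨w', ws'⟩
      · exact absurd ht (pvSplitChar_ne_nil t)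
      rw [ht] at h
      cases h
      obtain ⟨h1, _⟩ := ih w' ws' ht
      have hu : pvCapUp ' ' = ' ' := by decide
      have hl : pvCapLow ' ' = ' ' := by decide
      constructor <;>
        simp [pvTitl, hu, hl, h1, pvCapitalize, pvRest]
    · rcases ht : pvSplitChar t with _ | ⟨w', ws'⟩
      · exact absurd ht (pvSplitChar_ne_nil t)
      simp only [pvSplitChar, if_neg hc, ht, List.cons.injEq] at h
      obtain ⟨hw, hws⟩ := h
      subst hw; subst hws
      obtain ⟨_, h2⟩ := ih w' ws' ht
      have hcs : (c == ' ') = false := by simp [hc]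
      constructor <;>
        simp [pvTitl, hcs, h2, pvCapitalize]

-- Assembly on the list level.
lemma pvMain (cs : List Char) :
    formatear_nombre_apellido (String.ofList cs) = formatear_nombre_apellido_alt (String.ofList cs) := by
  simp only [formatear_nombre_apellido, formatear_nombre_apellido_alt, generar_titulo,
    String.toList_ofList]
  rw [pvAux_eq_filter]
  have htrim := pvTrim_loop ((cs.filter pvKeep).length : Int) (cs.filter pvKeep) 0 [] (by simp)
  push_cast at htrim
  rw [htrim]
  simp only [List.nil_append]
  set aux := cs.filter pvKeep with haux
  set ret := if aux.getLast? = some ' ' then aux.dropLast else aux with hret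
  have hsame : (if PySem.Chars.endswith aux [' '] = true then aux.dropLast else aux) = ret := by
    rw [pvEndswith_space]
    by_cases h : aux.getLast? = some ' ' <;> simp [hret, h]
  rw [hsame]
  have htit := pvTitulo_loop ret ret 0 [] rfl
  push_cast at htit
  simp only [List.nil_append, Bool.true_or] at htit
  rw [htit, pvSplitOn_eq]
  rcases h : pvSplitChar ret with _ | ⟨w, ws⟩
  · exact absurd h (pvSplitChar_ne_nil ret)
  · rw [pvJoin_eq, (pvTitl_split ret w ws h).1]

-- ===== VERDICT (by name: the statement is the Claim_ definition above) =====
theorem formatear_nombre_apellido_spec : Claim_equal_formatear_nombre_apellido := by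
  intro cadena _
  unfold Spec_formatear_nombre_apellido
  have := pvMain cadena.toList
  simpa using this
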